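-- pv_equiv track=rewrite | github.com/justinvulz/dollar_game | lib/cube.py | get_largest_cyclic_factor_cube
-- ===== SOURCE A (Python) =====
-- PRIME_FACTOR = {
--     2 : [2],
--     3 : [3],
--     4 : [4],
--     5 : [5],
--     6 : [2,3],
--     7 : [7],
--     8 : [8],
--     9 : [9],
--     10 : [2,5],
--     11 : [11],
--     12 : [4,3],
--     13 : [13],
--     14 : [2,7],
--     15 : [5,3],
--     16 : [16],
--     17 : [17],
--     18 : [9,2],
--     19 : [19],
--     20 : [5,4],
--     21 : [7,3],
-- }
--
-- ODD_PRIME = [3,5,7,11,13,17,19,23,29,31,37,41,43,47,53,59,61,67,71,73,79,83,89,97]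
--
-- def v2(x)  -> int:
--     n = 0
--     while x%2 == 0:
--         n += 1
--         x = x//2
--     return n
--
-- def v2_largest_cyclic_factor_cube(n: int) -> int:
--     u = max(v2(x)+x for x in range(1,n))
--     u = max(u, v2(n)+n-1)
--     return u
--
-- def get_largest_cyclic_factor_cube(n: int) -> int:
--     ans = 2**v2_largest_cyclic_factor_cube(n)
--     for p in ODD_PRIME:
--         if p > n:
--             break
--         flag =1
--         for i in range(2,n+1):
--             for f in PRIME_FACTOR[i]:
--                 if f%p ==0 and f > flag:
--                     flag =f
--         ans *= flag
--     return ans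
-- ===== SOURCE B (Python) =====
-- PRIME_FACTOR = {
--     2 : [2],
--     3 : [3],
--     4 : [4],
--     5 : [5],
--     6 : [2,3],
--     7 : [7],
--     8 : [8],
--     9 : [9],
--     10 : [2,5],
--     11 : [11],
--     12 : [4,3],
--     13 : [13],
--     14 : [2,7],
--     15 : [5,3],
--     16 : [16],
--     17 : [17],
--     18 : [9,2],
--     19 : [19],
--     20 : [5,4],
--     21 : [7,3],
-- }
--
-- def _v2(x):
--     return 0 if x % 2 else 1 + _v2(x // 2)
--
-- def get_largest_cyclic_factor_cube(n):
--     e = max(_v2(x) + x for x in range(1, n))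
--     e = max(e, _v2(n) + n - 1)
--     best = {}
--     for i in range(2, n + 1):
--         for f in PRIME_FACTOR[i]:
--             if f % 2:
--                 p = f
--                 d = 3
--                 while d * d <= f:
--                     if f % d == 0:
--                         p = d
--                         break
--                     d += 2
--                 if best.get(p, 1) < f:
--                     best[p] = f
--     ans = 2 ** e
--     for v in best.values():
--         ans *= v
--     return ans
-- ===== Notes on version B (the rewrite author's own statement) =====
-- stated objective: faster
-- what changed: Instead of rescanning the whole factor table once per odd prime (flag loop per prime), B makes a single pass over the table, keying the best odd prime power by its smallest prime factor in a dict, then multiplies the collected values.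
import Mathlib
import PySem

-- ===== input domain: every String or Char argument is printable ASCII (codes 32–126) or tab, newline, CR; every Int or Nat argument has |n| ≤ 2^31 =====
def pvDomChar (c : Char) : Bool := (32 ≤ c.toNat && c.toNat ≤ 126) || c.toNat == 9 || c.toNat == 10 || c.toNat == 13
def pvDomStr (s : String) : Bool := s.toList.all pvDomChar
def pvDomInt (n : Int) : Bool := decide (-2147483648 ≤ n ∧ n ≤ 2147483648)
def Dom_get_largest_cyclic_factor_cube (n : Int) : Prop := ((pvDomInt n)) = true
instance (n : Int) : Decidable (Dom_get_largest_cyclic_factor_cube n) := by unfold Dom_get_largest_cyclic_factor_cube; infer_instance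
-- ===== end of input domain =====

-- B replaces A's per-odd-prime rescans of the factor table with one pass that keys the best
-- prime-power by its prime in a dict (objective: faster, fewer table scans; same results on 2 ≤ n ≤ 21).

-- ===== PORT A =====
-- module constant PRIME_FACTOR (identical literal in A's module and in Source B; defined once here, used by both ports)
def primeFactorTable : PySem.Dict Int (List Int) := PySem.Dict.ofList
  [(2,[2]),(3,[3]),(4,[4]),(5,[5]),(6,[2,3]),(7,[7]),(8,[8]),(9,[9]),(10,[2,5]),(11,[11]),
   (12,[4,3]),(13,[13]),(14,[2,7]),(15,[5,3]),(16,[16]),(17,[17]),(18,[9,2]),(19,[19]),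
   (20,[5,4]),(21,[7,3])]

def oddPrimeList : List Int := [3,5,7,11,13,17,19,23,29,31,37,41,43,47,53,59,61,67,71,73,79,83,89,97]

-- A's `while x % 2 == 0` loop with counter n; fuel x.natAbs+1 suffices for every x ≥ 1
-- (v2 is only called on 1 ≤ x inside Pre_; on x = 0 Python diverges, outside Pre_).
def v2Fuel : Nat → Int → Int → Int
  | 0, acc, _ => acc
  | fuel+1, acc, x =>
      if PySem.Int.mod x 2 = 0 then v2Fuel fuel (acc + 1) (PySem.Int.floordiv x 2) else acc

def v2 (x : Int) : Int := v2Fuel (x.natAbs + 1) 0 x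

-- u = max(v2(x)+x for x in range(1,n)); empty generator (n ≤ 1) is Python's ValueError, excluded by Pre_
def v2_largest_cyclic_factor_cube (n : Int) : Int :=
  let u := (PySem.List.max? ((PySem.List.pyRange 1 n 1).map (fun x => v2 x + x)) (fun y => y)).getD 0
  max u (v2 n + n - 1)

-- inner double loop computing flag for a fixed odd prime p; PRIME_FACTOR[i] KeyError (n ≥ 22) excluded by Pre_
def flagFor (n p : Int) : Int :=
  (PySem.List.pyRange 2 (n + 1) 1).foldl (fun flag i =>
    ((primeFactorTable.get? i).getD []).foldl (fun flag f =>
      if PySem.Int.mod f p = 0 ∧ f > flag then f else flag) flag) 1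

-- for p in ODD_PRIME with break on p > n
def aLoop (n : Int) : Int → List Int → Int
  | ans, [] => ans
  | ans, p :: rest => if p > n then ans else aLoop n (ans * flagFor n p) rest

def get_largest_cyclic_factor_cube (n : Int) : Int :=
  -- 2**u : exponent u ≥ 0 on every input inside Pre_, so toNat is exact
  let ans := (2 : Int) ^ (v2_largest_cyclic_factor_cube n).toNat
  aLoop n ans oddPrimeList

-- ===== PORT B =====
-- Source B's recursive _v2; fuel x.natAbs+1 suffices for every x ≥ 1 (x = 0 diverges in Python, outside Pre_)
def altV2Fuel : Nat → Int → Int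
  | 0, _ => 0
  | fuel+1, x =>
      if PySem.Int.mod x 2 = 0 then 1 + altV2Fuel fuel (PySem.Int.floordiv x 2) else 0

def altV2 (x : Int) : Int := altV2Fuel (x.natAbs + 1) x

-- Source B's trial-division loop: p = f; d = 3; while d*d <= f: if f % d == 0: p = d; break; d += 2
-- fuel f.natAbs+1 bounds the number of increments of d
def altSpf : Nat → Int → Int → Int
  | 0, _, f => f
  | fuel+1, d, f =>
      if d * d ≤ f then (if PySem.Int.mod f d = 0 then d else altSpf fuel (d + 2) f) else f

-- one pass over the table accumulating best[p] = largest odd prime power with prime p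
def altBest (n : Int) : PySem.Dict Int Int :=
  (PySem.List.pyRange 2 (n + 1) 1).foldl (fun best i =>
    ((primeFactorTable.get? i).getD []).foldl (fun best f =>
      if PySem.Int.mod f 2 ≠ 0 then
        let p := altSpf (f.natAbs + 1) 3 f
        if best.getD p 1 < f then best.insert p f else best
      else best) best) PySem.Dict.empty

def get_largest_cyclic_factor_cube_alt (n : Int) : Int :=
  let e := max ((PySem.List.max? ((PySem.List.pyRange 1 n 1).map (fun x => altV2 x + x)) (fun y => y)).getD 0)
               (altV2 n + n - 1)
  -- 2**e : e ≥ 0 on every input inside Pre_, so toNat is exact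
  (altBest n).values.foldl (· * ·) ((2 : Int) ^ e.toNat)

-- ===== PRECONDITION & SPEC =====
-- Pre_ is exactly where A returns: n ≤ 1 raises ValueError (max of an empty generator),
-- n ≥ 22 raises KeyError (PRIME_FACTOR has keys 2..21 only).
def Pre_get_largest_cyclic_factor_cube (n : Int) : Prop := 2 ≤ n ∧ n ≤ 21
instance (n : Int) : Decidable (Pre_get_largest_cyclic_factor_cube n) := by
  unfold Pre_get_largest_cyclic_factor_cube; infer_instance

def pvWitness_get_largest_cyclic_factor_cube : Int := 6

def Spec_get_largest_cyclic_factor_cube (n : Int) (out : Int) : Prop := out = get_largest_cyclic_factor_cube_alt n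
instance (n : Int) (out : Int) : Decidable (Spec_get_largest_cyclic_factor_cube n out) := by unfold Spec_get_largest_cyclic_factor_cube; infer_instance

-- ===== CLAIM (what is proved, stated in full; the proofs are below) =====
def Claim_equal_get_largest_cyclic_factor_cube : Prop := ∀ (n : Int), Dom_get_largest_cyclic_factor_cube n → Pre_get_largest_cyclic_factor_cube n → Spec_get_largest_cyclic_factor_cube n (get_largest_cyclic_factor_cube n)

-- ===== LEMMAS AND PROOFS =====

-- ===== VERDICT (by name: the statement is the Claim_ definition above) =====
theorem get_largest_cyclic_factor_cube_spec : Claim_equal_get_largest_cyclic_factor_cube := by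
  intro n _ hpre
  obtain ⟨h1, h2⟩ := hpre
  unfold Spec_get_largest_cyclic_factor_cube
  interval_cases n <;> decide
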